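-- pv_equiv track=rewrite | github.com/AlexSidDev/NLP_HW2 | src/validation_utils.py | preds_to_bio
-- ===== SOURCE A (Python) =====
-- def preds_to_bio(preds: list, word_inds: list, labels_mapping: dict):
--     bio_preds = []
--     previous_ind = None
--     for i, pred in enumerate(preds):
--         if word_inds[i] is None or word_inds[i] == previous_ind:
--             continue
--         bio_preds.append(labels_mapping[pred])
--         previous_ind = word_inds[i]
--     return bio_preds
-- ===== SOURCE B (Python) =====
-- def preds_to_bio(preds: list, word_inds: list, labels_mapping: dict):
--     # pipeline: filter out None word indices, drop entries equal to their
--     # predecessor's word index (zip-with-shifted-self), then map labels.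
--     filtered = [(p, word_inds[i]) for i, p in enumerate(preds)
--                 if word_inds[i] is not None]
--     firsts = [pw for prev, pw in zip([None] + filtered, filtered)
--               if prev is None or prev[1] != pw[1]]
--     return [labels_mapping[p] for p, _ in firsts]
-- ===== Notes on version B (the rewrite author's own statement) =====
-- stated objective: alternative
-- what changed: Replaces A's single stateful loop carrying previous_ind by a three-stage pipeline: filter out None word indices, drop entries whose word index equals their immediate predecessor's (zip with the shifted list), then map labels.
import Mathlib
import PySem

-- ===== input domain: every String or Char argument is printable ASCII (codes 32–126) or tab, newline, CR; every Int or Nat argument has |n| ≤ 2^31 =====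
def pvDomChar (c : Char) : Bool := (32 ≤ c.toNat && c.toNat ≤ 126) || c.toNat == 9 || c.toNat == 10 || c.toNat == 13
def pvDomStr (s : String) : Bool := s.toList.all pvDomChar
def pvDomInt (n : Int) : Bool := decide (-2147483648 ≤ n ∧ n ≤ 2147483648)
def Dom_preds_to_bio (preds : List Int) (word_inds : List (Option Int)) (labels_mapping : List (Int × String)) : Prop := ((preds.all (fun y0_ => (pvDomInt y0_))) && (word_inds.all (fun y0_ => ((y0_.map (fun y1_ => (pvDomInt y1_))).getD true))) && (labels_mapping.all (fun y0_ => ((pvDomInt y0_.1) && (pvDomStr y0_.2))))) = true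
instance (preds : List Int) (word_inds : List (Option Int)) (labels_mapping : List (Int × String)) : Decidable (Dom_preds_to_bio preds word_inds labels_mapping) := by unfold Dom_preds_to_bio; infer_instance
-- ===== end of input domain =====

-- B replaces A's stateful previous_ind loop by a three-stage pipeline
-- (filter None indices, drop entries equal to their predecessor's word index, map labels); objective: alternative decomposition, same cost.

-- ===== PORT A =====
def preds_to_bio (preds : List Int) (word_inds : List (Option Int)) (labels_mapping : List (Int × String)) : List String :=
  -- for i, pred in enumerate(preds): skip if word_inds[i] is None or == previous_ind
  ((PySem.List.enumerate preds 0).foldl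
    (fun (st : List String × Option Int) ip =>
      match PySem.List.pyGet? word_inds ip.1 with
      | some (some v) =>
          if some v = st.2 then st
          else (st.1 ++ [PySem.Dict.getD (PySem.Dict.mk labels_mapping) ip.2 ""], some v)
      | some none => st          -- word_inds[i] is None: continue
      | none => st)              -- IndexError in Python; excluded by Pre_
    ([], none)).1

-- ===== PORT B =====
def preds_to_bio_alt (preds : List Int) (word_inds : List (Option Int)) (labels_mapping : List (Int × String)) : List String :=
  let filtered : List (Int × Int) :=
    (PySem.List.enumerate preds 0).filterMap (fun ip =>
      match PySem.List.pyGet? word_inds ip.1 with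
      | some (some v) => some (ip.2, v)
      | _ => none)               -- drops None word indices (IndexError excluded by Pre_)
  let firsts : List (Int × Int) :=
    (List.zip ((none : Option (Int × Int)) :: filtered.map some) filtered).filterMap
      (fun q =>
        match q.1 with
        | none => some q.2
        | some prev => if prev.2 ≠ q.2.2 then some q.2 else none)
  firsts.map (fun pw => PySem.Dict.getD (PySem.Dict.mk labels_mapping) pw.1 "")

-- ===== PRECONDITION & SPEC =====
-- Pre_ excludes exactly the inputs where Python A raises: IndexError when word_inds is
-- shorter than preds, and KeyError when a KEPT pred (non-None word index differing from
-- the last non-None one before it) is missing from labels_mapping.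
def Pre_preds_to_bio (preds : List Int) (word_inds : List (Option Int)) (labels_mapping : List (Int × String)) : Prop :=
  preds.length ≤ word_inds.length ∧
  ∀ i : Nat, i < preds.length →
    (word_inds.getD i none ≠ none ∧
     word_inds.getD i none ≠ ((word_inds.take i).filterMap id).getLast?) →
    ∃ q ∈ labels_mapping, q.1 = preds.getD i 0
instance (preds : List Int) (word_inds : List (Option Int)) (labels_mapping : List (Int × String)) : Decidable (Pre_preds_to_bio preds word_inds labels_mapping) := by unfold Pre_preds_to_bio; infer_instance
def pvWitness_preds_to_bio : List Int × List (Option Int) × (List (Int × String)) :=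
  ([1, 2, 2, 0], [some 0, none, some 0, some 1], [(0, "O"), (1, "B-X"), (2, "I-X")])

def Spec_preds_to_bio (preds : List Int) (word_inds : List (Option Int)) (labels_mapping : List (Int × String)) (out : List String) : Prop := out = preds_to_bio_alt preds word_inds labels_mapping
instance (preds : List Int) (word_inds : List (Option Int)) (labels_mapping : List (Int × String)) (out : List String) : Decidable (Spec_preds_to_bio preds word_inds labels_mapping out) := by unfold Spec_preds_to_bio; infer_instance

-- ===== CLAIM (what is proved, stated in full; the proofs are below) =====
def Claim_equal_preds_to_bio : Prop := ∀ (preds : List Int) (word_inds : List (Option Int)) (labels_mapping : List (Int × String)), Dom_preds_to_bio preds word_inds labels_mapping → Pre_preds_to_bio preds word_inds labels_mapping → Spec_preds_to_bio preds word_inds labels_mapping (preds_to_bio preds word_inds labels_mapping)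

-- ===== LEMMAS AND PROOFS =====

-- common recursive characterisation: the list of BIO labels, consuming preds head-first
def pvBio (word_inds : List (Option Int)) (labels_mapping : List (Int × String)) : Int → Option Int → List Int → List String
  | _, _, [] => []
  | i, prev, p :: ps =>
      match PySem.List.pyGet? word_inds i with
      | some (some v) =>
          if some v = prev then pvBio word_inds labels_mapping (i + 1) prev ps
          else PySem.Dict.getD (PySem.Dict.mk labels_mapping) p "" :: pvBio word_inds labels_mapping (i + 1) (some v) ps
      | _ => pvBio word_inds labels_mapping (i + 1) prev ps

-- recursive characterisation of B's first stage
def pvFilt (word_inds : List (Option Int)) : Int → List Int → List (Int × Int)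
  | _, [] => []
  | i, p :: ps =>
      match PySem.List.pyGet? word_inds i with
      | some (some v) => (p, v) :: pvFilt word_inds (i + 1) ps
      | _ => pvFilt word_inds (i + 1) ps

-- recursive characterisation of B's second stage
def pvDed : Option (Int × Int) → List (Int × Int) → List (Int × Int)
  | _, [] => []
  | none, x :: xs => x :: pvDed (some x) xs
  | some q, x :: xs => if q.2 ≠ x.2 then x :: pvDed (some x) xs else pvDed (some x) xs

theorem pvA_foldl (word_inds : List (Option Int)) (labels_mapping : List (Int × String))
    (preds : List Int) :
    ∀ (s : Int) (acc : List String) (prev : Option Int),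
    ((PySem.List.enumerate preds s).foldl
      (fun (st : List String × Option Int) ip =>
        match PySem.List.pyGet? word_inds ip.1 with
        | some (some v) =>
            if some v = st.2 then st
            else (st.1 ++ [PySem.Dict.getD (PySem.Dict.mk labels_mapping) ip.2 ""], some v)
        | some none => st
        | none => st)
      (acc, prev)).1 = acc ++ pvBio word_inds labels_mapping s prev preds := by
  induction preds with
  | nil => intro s acc prev; simp [PySem.List.enumerate_nil, pvBio]
  | cons p ps ih =>
      intro s acc prev
      rw [PySem.List.enumerate_cons]
      simp only [List.foldl_cons, pvBio]
      cases h : PySem.List.pyGet? word_inds s with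
      | none => simp [ih]
      | some o =>
          cases o with
          | none => simp [ih]
          | some v =>
              simp only [h]
              by_cases hv : some v = prev
              · simp [hv, ih]
              · simp [hv, ih]

theorem pvB_filt (word_inds : List (Option Int)) (preds : List Int) :
    ∀ (s : Int),
    (PySem.List.enumerate preds s).filterMap (fun ip =>
      match PySem.List.pyGet? word_inds ip.1 with
      | some (some v) => some (ip.2, v)
      | _ => none) = pvFilt word_inds s preds := by
  induction preds with
  | nil => intro s; simp [PySem.List.enumerate_nil, pvFilt]
  | cons p ps ih =>
      intro s
      rw [PySem.List.enumerate_cons]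
      simp only [List.filterMap_cons, pvFilt]
      cases h : PySem.List.pyGet? word_inds s with
      | none => simp [ih]
      | some o => cases o with
          | none => simp [ih]
          | some v => simp [h, ih]

theorem pvB_ded (l : List (Int × Int)) :
    ∀ (prev : Option (Int × Int)),
    (List.zip (prev :: l.map some) l).filterMap
      (fun q =>
        match q.1 with
        | none => some q.2
        | some pr => if pr.2 ≠ q.2.2 then some q.2 else none) = pvDed prev l := by
  induction l with
  | nil => intro prev; simp [pvDed]
  | cons x xs ih =>
      intro prev
      simp only [List.map_cons, List.zip_cons_cons]
      cases prev with
      | none =>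
          rw [List.filterMap_cons_some (f := fun (q : Option (Int × Int) × (Int × Int)) =>
                match q.1 with
                | none => some q.2
                | some pr => if pr.2 ≠ q.2.2 then some q.2 else none) (b := x) rfl, ih (some x)]
          rfl
      | some q =>
          by_cases hq : q.2 ≠ x.2
          · rw [List.filterMap_cons_some (f := fun (q : Option (Int × Int) × (Int × Int)) =>
                  match q.1 with
                  | none => some q.2
                  | some pr => if pr.2 ≠ q.2.2 then some q.2 else none) (b := x)
                  (a := (some q, x)) (by simp only []; exact if_pos hq),
                ih (some x)]
            simp [pvDed, hq]
          · rw [List.filterMap_cons_none (f := fun (q : Option (Int × Int) × (Int × Int)) =>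
                  match q.1 with
                  | none => some q.2
                  | some pr => if pr.2 ≠ q.2.2 then some q.2 else none)
                  (a := (some q, x)) (by simp only []; exact if_neg hq),
                ih (some x)]
            simp [pvDed, hq]

theorem pvDed_bio (word_inds : List (Option Int)) (labels_mapping : List (Int × String))
    (preds : List Int) :
    ∀ (s : Int) (prev : Option (Int × Int)),
    (pvDed prev (pvFilt word_inds s preds)).map
        (fun pw => PySem.Dict.getD (PySem.Dict.mk labels_mapping) pw.1 "")
      = pvBio word_inds labels_mapping s (prev.map (·.2)) preds := by
  induction preds with
  | nil => intro s prev; simp [pvFilt, pvBio, pvDed]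
  | cons p ps ih =>
      intro s prev
      simp only [pvFilt, pvBio]
      cases h : PySem.List.pyGet? word_inds s with
      | none => simpa [h] using ih (s + 1) prev
      | some o =>
          cases o with
          | none => simpa [h] using ih (s + 1) prev
          | some v =>
              simp only [h]
              cases prev with
              | none =>
                  simp only [Option.map_none]
                  simp only [pvDed]
                  simpa using ih (s + 1) (some (p, v))
              | some q =>
                  by_cases hq : q.2 = v
                  · simp only [pvDed, Option.map_some]
                    rw [if_neg (by simp [hq]), if_pos (by simp [hq])]
                    simpa [hq] using ih (s + 1) (some (p, v))
                  · simp only [pvDed, Option.map_some]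
                    rw [if_pos (by simp [Ne, eq_comm] at hq ⊢; exact fun hh => hq hh),
                        if_neg (by simp [hq]; exact fun hh => (hq hh.symm).elim)]
                    simpa using ih (s + 1) (some (p, v))

-- ===== VERDICT (by name: the statement is the Claim_ definition above) =====
theorem preds_to_bio_spec : Claim_equal_preds_to_bio := by
  intro preds word_inds labels_mapping _ _
  unfold Spec_preds_to_bio preds_to_bio preds_to_bio_alt
  rw [pvA_foldl]
  simp only [pvB_filt, pvB_ded, pvDed_bio]
  simp
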